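-- pv_equiv track=rewrite | github.com/RiderKick2204/CS114.O21.KHCL---20520375---20520918- | Wecode_20520375/BaiThucHanh2/dichria.py | rotate_border_x
-- ===== SOURCE A (Python) =====
-- def rotate_border_x(border,matrix,x,row,col):
--
--     k = 0
--     if (row-x-1==x):
--         for i in range(x,col-x):
--             matrix[x][i] = border[k]
--             k = k + 1
--         return matrix
--     if (col-x-1==x):
--         for i in range(x,row-x):
--             matrix[i][col-x-1] = border[k]
--             k = k + 1
--         return matrix
--
--
--     for i in range(x,col-x):
--         matrix[x][i] = border[k]
--         k = k + 1
--     for i in range(x+1,row-x):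
--         matrix[i][col-x-1] = border[k]
--         k = k + 1
--     for i in range(x+1,col-x):
--         matrix[row-x-1][col-i-1] = border[k]
--         k = k + 1
--     for i in range(x+1,row-x-1):
--         matrix[row-i-1][x] = border[k]
--         k = k + 1
--     return matrix
-- ===== SOURCE B (Python) =====
-- def rotate_border_x(border, matrix, x, row, col):
--     # Same two degenerate guards as the task demands (single-row / single-column ring);
--     # the general case is a single clockwise perimeter walk with a position and a
--     # direction vector that turns at the ring's edges, instead of four coordinate loops.
--     if row - x - 1 == x:
--         for i in range(x, col - x):
--             matrix[x][i] = border[i - x]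
--         return matrix
--     if col - x - 1 == x:
--         for i in range(x, row - x):
--             matrix[i][col - x - 1] = border[i - x]
--         return matrix
--     lo, hi_r, hi_c = x, row - x - 1, col - x - 1
--     r, c, dr, dc = x, x, 0, 1
--     for k in range(2 * (row - 2 * x) + 2 * (col - 2 * x) - 4):
--         matrix[r][c] = border[k]
--         nr, nc = r + dr, c + dc
--         if nr < lo or nr > hi_r or nc < lo or nc > hi_c:
--             dr, dc = dc, -dr
--             nr, nc = r + dr, c + dc
--         r, c = nr, nc
--     return matrix
-- ===== Notes on version B (the rewrite author's own statement) =====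
-- stated objective: alternative
-- what changed: A writes the ring through four separate coordinate loops (top, right, bottom, left) threading a running border counter; B keeps only the two degenerate guards and replaces the four loops with a single clockwise perimeter walk driven by a state machine (current cell plus direction vector) that turns clockwise whenever the next cell would leave the ring.
-- outside the precondition, e.g. on rotate_border_x([4, 5, 6, 7, 8], [[1, 2, 3]], 0, 0, 3): A returns [[8, 7, 6]], B raises IndexError; on rotate_border_x([5], [[1], [2]], 0, 2, 0): A returns [[1], [5]], B returns [[1], [2]]
import Mathlib
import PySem

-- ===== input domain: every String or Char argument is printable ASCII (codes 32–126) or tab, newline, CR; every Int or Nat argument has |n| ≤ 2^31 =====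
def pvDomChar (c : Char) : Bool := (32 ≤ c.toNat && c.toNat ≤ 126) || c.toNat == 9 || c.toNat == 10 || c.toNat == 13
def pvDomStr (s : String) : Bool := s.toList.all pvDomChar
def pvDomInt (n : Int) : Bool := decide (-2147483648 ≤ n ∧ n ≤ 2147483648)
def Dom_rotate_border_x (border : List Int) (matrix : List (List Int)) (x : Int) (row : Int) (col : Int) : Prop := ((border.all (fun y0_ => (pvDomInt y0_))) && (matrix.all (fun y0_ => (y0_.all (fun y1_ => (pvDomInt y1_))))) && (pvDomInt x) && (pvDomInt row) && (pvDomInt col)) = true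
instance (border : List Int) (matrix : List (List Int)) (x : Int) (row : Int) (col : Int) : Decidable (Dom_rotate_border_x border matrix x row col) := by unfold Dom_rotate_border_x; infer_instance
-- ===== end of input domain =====

-- B replaces A's four coordinate loops by a single clockwise perimeter walk (position +
-- direction vector, turning at the ring's edges); same return value, and both Pythons also
-- mutate `matrix` identically in place — the equivalence proved here is about the RETURN value.


-- shared Python-semantics primitives: `matrix[i][j] = v` and `border[k]`
-- (exact inside Pre_, where every index Python touches is in range; pySetD/pyGetD
-- follow Python's indexing, including negative indices)
def setCell (m : List (List Int)) (i j v : Int) : List (List Int) :=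
  PySem.List.pySetD m i (PySem.List.pySetD (PySem.List.pyGetD m i []) j v)

def getB (border : List Int) (k : Int) : Int := PySem.List.pyGetD border k 0

-- ===== PORT A =====
def rotate_border_x (border : List Int) (matrix : List (List Int)) (x : Int) (row : Int) (col : Int) : List (List Int) :=
  -- k = 0; the four loops thread (matrix, k) through pyRange folds, exactly as A does
  if row - x - 1 = x then
    ((PySem.List.pyRange x (col - x) 1).foldl
      (fun st i => (setCell st.1 x i (getB border st.2), st.2 + 1)) (matrix, (0 : Int))).1
  else if col - x - 1 = x then
    ((PySem.List.pyRange x (row - x) 1).foldl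
      (fun st i => (setCell st.1 i (col - x - 1) (getB border st.2), st.2 + 1)) (matrix, (0 : Int))).1
  else
    let s1 := (PySem.List.pyRange x (col - x) 1).foldl
      (fun st i => (setCell st.1 x i (getB border st.2), st.2 + 1)) (matrix, (0 : Int))
    let s2 := (PySem.List.pyRange (x + 1) (row - x) 1).foldl
      (fun st i => (setCell st.1 i (col - x - 1) (getB border st.2), st.2 + 1)) s1
    let s3 := (PySem.List.pyRange (x + 1) (col - x) 1).foldl
      (fun st i => (setCell st.1 (row - x - 1) (col - i - 1) (getB border st.2), st.2 + 1)) s2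
    let s4 := (PySem.List.pyRange (x + 1) (row - x - 1) 1).foldl
      (fun st i => (setCell st.1 (row - i - 1) x (getB border st.2), st.2 + 1)) s3
    s4.1

-- ===== PORT B =====
-- one step of B's clockwise walk: state (m, r, c, dr, dc); write border[k] at (r, c), then
-- step in direction (dr, dc), turning clockwise when the next cell would leave the ring
def walkStep (border : List Int) (lo hiR hiC : Int)
    (st : List (List Int) × Int × Int × Int × Int) (k : Int) :
    List (List Int) × Int × Int × Int × Int :=
  let m := setCell st.1 st.2.1 st.2.2.1 (getB border k)
  let nr := st.2.1 + st.2.2.2.1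
  let nc := st.2.2.1 + st.2.2.2.2
  if nr < lo ∨ nr > hiR ∨ nc < lo ∨ nc > hiC then
    (m, st.2.1 + st.2.2.2.2, st.2.2.1 - st.2.2.2.1, st.2.2.2.2, -st.2.2.2.1)
  else
    (m, nr, nc, st.2.2.2.1, st.2.2.2.2)

def rotate_border_x_alt (border : List Int) (matrix : List (List Int)) (x : Int) (row : Int) (col : Int) : List (List Int) :=
  if row - x - 1 = x then
    (PySem.List.pyRange x (col - x) 1).foldl
      (fun m i => setCell m x i (getB border (i - x))) matrix
  else if col - x - 1 = x then
    (PySem.List.pyRange x (row - x) 1).foldl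
      (fun m i => setCell m i (col - x - 1) (getB border (i - x))) matrix
  else
    ((PySem.List.pyRange 0 (2 * (row - 2 * x) + 2 * (col - 2 * x) - 4) 1).foldl
      (walkStep border x (row - x - 1) (col - x - 1))
      (matrix, x, x, (0 : Int), (1 : Int))).1

-- ===== PRECONDITION & SPEC =====
-- Pre_ helpers: Python index-validity of one ring side, by interval endpoints
-- (pvInR n i = the Python index i is valid for a list of length n, negative indices wrapping)
def pvInR (n : Nat) (i : Int) : Bool := decide (-(n : Int) ≤ i) && decide (i < (n : Int))
def pvRL (matrix : List (List Int)) (i : Int) : Int := ((PySem.List.pyGetD matrix i []).length : Int)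
-- writes matrix[r][i] for i in [a,b): one row, a contiguous block of columns
def pvRowSegOk (matrix : List (List Int)) (a b r : Int) : Bool :=
  decide (b ≤ a) || (pvInR matrix.length r && decide (-(pvRL matrix r) ≤ a) && decide (b - 1 < pvRL matrix r))
-- writes matrix[i][c] for i in [a,b): a contiguous block of rows, one column each
def pvColSegOk (matrix : List (List Int)) (a b c : Int) : Bool :=
  decide (b ≤ a) || (decide (-((matrix.length : Nat) : Int) ≤ a) && decide (b - 1 < ((matrix.length : Nat) : Int)) &&
    (PySem.List.pyRange a b 1).all (fun i => pvInR (PySem.List.pyGetD matrix i []).length c))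

-- Pre_ = A's no-raise condition (every matrix index each loop touches is a valid, possibly
-- negative, Python index and border is long enough for every border[k] read), minus the
-- degenerate calls whose ring has one dimension ≤ 0 while the other is ≥ 2: those lie outside
-- the function's natural domain — there A returns accidental partial writes through Python's
-- negative-index wraparound, while B's walk raises or writes other cells (cites in claim.json).
def Pre_rotate_border_x (border : List Int) (matrix : List (List Int)) (x : Int) (row : Int) (col : Int) : Prop :=
  ¬ ((row - 2 * x ≤ 0 ∧ 2 ≤ col - 2 * x) ∨ (col - 2 * x ≤ 0 ∧ 2 ≤ row - 2 * x)) ∧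
  (if row - 2 * x = 1 then
    pvRowSegOk matrix x (col - x) x && decide (col - 2 * x ≤ (border.length : Int))
  else if col - 2 * x = 1 then
    pvColSegOk matrix x (row - x) (col - x - 1) && decide (row - 2 * x ≤ (border.length : Int))
  else
    pvRowSegOk matrix x (col - x) x &&
    pvColSegOk matrix (x + 1) (row - x) (col - x - 1) &&
    pvRowSegOk matrix x (col - x - 1) (row - x - 1) &&
    pvColSegOk matrix (x + 1) (row - x - 1) x &&
    decide (2 * (row - 2 * x) + 2 * (col - 2 * x) - 4 ≤ (border.length : Int))) = true
instance (border : List Int) (matrix : List (List Int)) (x : Int) (row : Int) (col : Int) : Decidable (Pre_rotate_border_x border matrix x row col) := by unfold Pre_rotate_border_x; infer_instance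

def pvWitness_rotate_border_x : List Int × List (List Int) × Int × Int × Int :=
  ([1, 2, 3, 4, 5, 6, 7, 8], [[0, 0, 0], [0, 0, 0], [0, 0, 0]], 0, 3, 3)

def Spec_rotate_border_x (border : List Int) (matrix : List (List Int)) (x : Int) (row : Int) (col : Int) (out : List (List Int)) : Prop := out = rotate_border_x_alt border matrix x row col
instance (border : List Int) (matrix : List (List Int)) (x : Int) (row : Int) (col : Int) (out : List (List Int)) : Decidable (Spec_rotate_border_x border matrix x row col out) := by unfold Spec_rotate_border_x; infer_instance

-- ===== CLAIM (what is proved, stated in full; the proofs are below) =====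
def Claim_equal_rotate_border_x : Prop := ∀ (border : List Int) (matrix : List (List Int)) (x : Int) (row : Int) (col : Int), Dom_rotate_border_x border matrix x row col → Pre_rotate_border_x border matrix x row col → Spec_rotate_border_x border matrix x row col (rotate_border_x border matrix x row col)

-- ===== LEMMAS AND PROOFS =====

-- the k-th perimeter cell, clockwise from (x,x) (proof-only canonical decode)
def ringCell (x row col k : Int) : Int × Int :=
  if k < col - 2 * x then (x, x + k)
  else if k < col - 2 * x + (row - 2 * x) - 1 then (x + 1 + (k - (col - 2 * x)), col - x - 1)
  else if k < 2 * (col - 2 * x) + (row - 2 * x) - 2 then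
    (row - x - 1, col - x - 2 - (k - (col - 2 * x + (row - 2 * x) - 1)))
  else (row - x - 2 - (k - (2 * (col - 2 * x) + (row - 2 * x) - 2)), x)

-- canonical single fold over the border index, used to connect both ports
def ringFold (border : List Int) (x row col : Int) (m : List (List Int)) : List (List Int) :=
  (PySem.List.pyRange 0 (2 * (row - 2 * x) + 2 * (col - 2 * x) - 4) 1).foldl
    (fun m' k => setCell m' (ringCell x row col k).1 (ringCell x row col k).2 (getB border k)) m

-- A's loop over i ∈ range(a,b) with running border counter k, re-indexed as a loop over the counter itself:
lemma seg_aux (border : List Int) (cell : Int → Int × Int) :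
    ∀ (n : Nat) (a b k0 : Int) (m : List (List Int)), (b - a).toNat = n →
    (PySem.List.pyRange a b 1).foldl
      (fun st i => (setCell st.1 (cell i).1 (cell i).2 (getB border st.2), st.2 + 1)) (m, k0)
    = ((PySem.List.pyRange k0 (k0 + (b - a)) 1).foldl
        (fun m' k => setCell m' (cell (a + (k - k0))).1 (cell (a + (k - k0))).2 (getB border k)) m,
       k0 + ((b - a).toNat : Int)) := by
  intro n
  induction n with
  | zero =>
    intro a b k0 m hn
    have hab : b ≤ a := by omega
    rw [PySem.List.pyRange_one_eq_nil hab, PySem.List.pyRange_one_eq_nil (by omega)]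
    simp [hn]
  | succ n ih =>
    intro a b k0 m hn
    have hab : a < b := by omega
    rw [PySem.List.pyRange_one_cons hab,
        PySem.List.pyRange_one_cons (show k0 < k0 + (b - a) by omega)]
    simp only [List.foldl_cons, sub_self, add_zero]
    rw [ih (a + 1) b (k0 + 1) _ (by omega)]
    have e1 : (k0 + 1) + (b - (a + 1)) = k0 + (b - a) := by ring
    have e2 : ∀ k : Int, (a + 1) + (k - (k0 + 1)) = a + (k - k0) := by intro k; ring
    simp only [e1, e2]
    have e3 : (k0 + 1) + (((b - (a + 1)).toNat : Nat) : Int) = k0 + ((b - a).toNat : Int) := by omega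
    rw [e3]

-- a fold over range(a,b) re-based at 0 (used for B's two guard loops)
lemma range_shift (f : List (List Int) → Int → List (List Int)) (a b : Int) (m : List (List Int)) :
    (PySem.List.pyRange a b 1).foldl f m
    = (PySem.List.pyRange 0 (b - a) 1).foldl (fun m' k => f m' (a + k)) m := by
  rw [PySem.List.pyRange_one a b, PySem.List.pyRange_one 0 (b - a), List.foldl_map, List.foldl_map]
  simp

-- B's walk goes n straight steps when every next cell stays inside the ring
lemma walk_run (border : List Int) (lo hiR hiC dr dc : Int) :
    ∀ (n : Nat) (k0 r0 c0 : Int) (m : List (List Int)),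
    (∀ j : Int, 0 ≤ j → j < (n : Int) →
      lo ≤ r0 + (j + 1) * dr ∧ r0 + (j + 1) * dr ≤ hiR ∧
      lo ≤ c0 + (j + 1) * dc ∧ c0 + (j + 1) * dc ≤ hiC) →
    (PySem.List.pyRange k0 (k0 + (n : Int)) 1).foldl (walkStep border lo hiR hiC) (m, r0, c0, dr, dc)
    = ((PySem.List.pyRange k0 (k0 + (n : Int)) 1).foldl
        (fun m' k => setCell m' (r0 + (k - k0) * dr) (c0 + (k - k0) * dc) (getB border k)) m,
       r0 + (n : Int) * dr, c0 + (n : Int) * dc, dr, dc) := by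
  intro n
  induction n with
  | zero =>
    intro k0 r0 c0 m _
    rw [PySem.List.pyRange_one_eq_nil (by omega)]
    simp
  | succ n ih =>
    intro k0 r0 c0 m hb
    have h0 := hb 0 le_rfl (by push_cast; omega)
    simp only [zero_add, one_mul] at h0
    have hend : k0 + ((n : Int) + 1) = (k0 + 1) + (n : Int) := by ring
    push_cast
    rw [hend, PySem.List.pyRange_one_cons (show k0 < (k0 + 1) + (n : Int) by omega)]
    simp only [List.foldl_cons]
    have hstep : walkStep border lo hiR hiC (m, r0, c0, dr, dc) k0
        = (setCell m r0 c0 (getB border k0), r0 + dr, c0 + dc, dr, dc) := by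
      simp only [walkStep]
      rw [if_neg (by omega)]
    rw [hstep, ih (k0 + 1) (r0 + dr) (c0 + dc) _ (by
      intro j hj0 hjn
      obtain ⟨a1, a2, a3, a4⟩ := hb (j + 1) (by omega) (by push_cast; omega)
      have e1 : r0 + dr + (j + 1) * dr = r0 + (j + 1 + 1) * dr := by ring
      have e2 : c0 + dc + (j + 1) * dc = c0 + (j + 1 + 1) * dc := by ring
      exact ⟨by rw [e1]; exact a1, by rw [e1]; exact a2, by rw [e2]; exact a3, by rw [e2]; exact a4⟩)]
    have hm : (PySem.List.pyRange (k0 + 1) ((k0 + 1) + (n : Int)) 1).foldl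
        (fun m' k => setCell m' ((r0 + dr) + (k - (k0 + 1)) * dr) ((c0 + dc) + (k - (k0 + 1)) * dc) (getB border k))
        (setCell m r0 c0 (getB border k0))
        = (PySem.List.pyRange (k0 + 1) ((k0 + 1) + (n : Int)) 1).foldl
        (fun m' k => setCell m' (r0 + (k - k0) * dr) (c0 + (k - k0) * dc) (getB border k))
        (setCell m r0 c0 (getB border k0)) := by
      apply PySem.List.foldl_congr_mem
      intro acc k _
      rw [show (r0 + dr) + (k - (k0 + 1)) * dr = r0 + (k - k0) * dr by ring,
          show (c0 + dc) + (k - (k0 + 1)) * dc = c0 + (k - k0) * dc by ring]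
    rw [hm, show r0 + dr + (n : Int) * dr = r0 + ((n : Int) + 1) * dr by ring,
        show c0 + dc + (n : Int) * dc = c0 + ((n : Int) + 1) * dc by ring,
        show setCell m (r0 + (k0 - k0) * dr) (c0 + (k0 - k0) * dc) (getB border k0) = setCell m r0 c0 (getB border k0) by simp]

-- one turning step of B's walk
lemma walk_turn (border : List Int) (lo hiR hiC k r c dr dc : Int) (m : List (List Int))
    (h : r + dr < lo ∨ r + dr > hiR ∨ c + dc < lo ∨ c + dc > hiC) :
    (PySem.List.pyRange k (k + 1) 1).foldl (walkStep border lo hiR hiC) (m, r, c, dr, dc)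
    = (setCell m r c (getB border k), r + dc, c - dr, dc, -dr) := by
  rw [PySem.List.pyRange_one_cons (by omega), PySem.List.pyRange_one_eq_nil (by omega),
      List.foldl_cons, List.foldl_nil]
  simp only [walkStep]
  rw [if_pos h]

-- walk_run with an Int-valued length
lemma walk_run' (border : List Int) (lo hiR hiC dr dc L k0 r0 c0 : Int) (hL : 0 ≤ L)
    (hb : ∀ j : Int, 0 ≤ j → j < L →
      lo ≤ r0 + (j + 1) * dr ∧ r0 + (j + 1) * dr ≤ hiR ∧
      lo ≤ c0 + (j + 1) * dc ∧ c0 + (j + 1) * dc ≤ hiC)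
    (m : List (List Int)) :
    (PySem.List.pyRange k0 (k0 + L) 1).foldl (walkStep border lo hiR hiC) (m, r0, c0, dr, dc)
    = ((PySem.List.pyRange k0 (k0 + L) 1).foldl
        (fun m' k => setCell m' (r0 + (k - k0) * dr) (c0 + (k - k0) * dc) (getB border k)) m,
       r0 + L * dr, c0 + L * dc, dr, dc) := by
  have hc : ((L.toNat : Nat) : Int) = L := by omega
  have h := walk_run border lo hiR hiC dr dc L.toNat k0 r0 c0 m
    (by intro j h0 hj; exact hb j h0 (by omega))
  rw [hc] at h
  exact h

lemma setCell_congr (m : List (List Int)) {i i' j j' v v' : Int}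
    (hi : i = i') (hj : j = j') (hv : v = v') : setCell m i j v = setCell m i' j' v' := by
  rw [hi, hj, hv]

lemma A_main (border : List Int) (matrix : List (List Int)) (x row col : Int)
    (hh : 2 ≤ row - 2 * x) (hw : 2 ≤ col - 2 * x) :
    rotate_border_x border matrix x row col = ringFold border x row col matrix := by
  unfold rotate_border_x
  rw [if_neg (by omega), if_neg (by omega)]
  dsimp only
  have hA1 := seg_aux border (fun i => ((x : Int), i)) ((col - x) - x).toNat x (col - x) 0 matrix rfl
  simp only at hA1
  rw [hA1,
      show (0:Int) + (col - x - x) = col - 2 * x by ring,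
      show (0:Int) + (((col - x - x).toNat : Nat) : Int) = col - 2 * x by omega]
  set M1 := (PySem.List.pyRange 0 (col - 2 * x) 1).foldl
    (fun m' k => setCell m' x (x + (k - 0)) (getB border k)) matrix with hM1
  have hA2 := seg_aux border (fun i => (i, col - x - 1)) ((row - x) - (x + 1)).toNat
    (x + 1) (row - x) (col - 2 * x) M1 rfl
  simp only at hA2
  rw [hA2,
      show col - 2 * x + (row - x - (x + 1)) = col - 2 * x + (row - 2 * x) - 1 by ring,
      show col - 2 * x + (((row - x - (x + 1)).toNat : Nat) : Int) = col - 2 * x + (row - 2 * x) - 1 by omega]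
  set M2 := (PySem.List.pyRange (col - 2 * x) (col - 2 * x + (row - 2 * x) - 1) 1).foldl
    (fun m' k => setCell m' (x + 1 + (k - (col - 2 * x))) (col - x - 1) (getB border k)) M1 with hM2
  have hA3 := seg_aux border (fun i => (row - x - 1, col - i - 1)) ((col - x) - (x + 1)).toNat
    (x + 1) (col - x) (col - 2 * x + (row - 2 * x) - 1) M2 rfl
  simp only at hA3
  rw [hA3,
      show col - 2 * x + (row - 2 * x) - 1 + (col - x - (x + 1)) = 2 * (col - 2 * x) + (row - 2 * x) - 2 by ring,
      show col - 2 * x + (row - 2 * x) - 1 + (((col - x - (x + 1)).toNat : Nat) : Int) = 2 * (col - 2 * x) + (row - 2 * x) - 2 by omega]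
  set M3 := (PySem.List.pyRange (col - 2 * x + (row - 2 * x) - 1) (2 * (col - 2 * x) + (row - 2 * x) - 2) 1).foldl
    (fun m' k => setCell m' (row - x - 1) (col - (x + 1 + (k - (col - 2 * x + (row - 2 * x) - 1))) - 1) (getB border k)) M2 with hM3
  have hA4 := seg_aux border (fun i => (row - i - 1, (x : Int))) ((row - x - 1) - (x + 1)).toNat
    (x + 1) (row - x - 1) (2 * (col - 2 * x) + (row - 2 * x) - 2) M3 rfl
  simp only at hA4
  rw [hA4,
      show 2 * (col - 2 * x) + (row - 2 * x) - 2 + (row - x - 1 - (x + 1)) = 2 * (row - 2 * x) + 2 * (col - 2 * x) - 4 by ring]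
  dsimp only
  unfold ringFold
  rw [PySem.List.pyRange_one_append 0 (col - 2 * x) (2 * (row - 2 * x) + 2 * (col - 2 * x) - 4) (by omega) (by omega),
      List.foldl_append,
      PySem.List.pyRange_one_append (col - 2 * x) (col - 2 * x + (row - 2 * x) - 1) (2 * (row - 2 * x) + 2 * (col - 2 * x) - 4) (by omega) (by omega),
      List.foldl_append,
      PySem.List.pyRange_one_append (col - 2 * x + (row - 2 * x) - 1) (2 * (col - 2 * x) + (row - 2 * x) - 2) (2 * (row - 2 * x) + 2 * (col - 2 * x) - 4) (by omega) (by omega),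
      List.foldl_append]
  have E1 : (PySem.List.pyRange 0 (col - 2 * x) 1).foldl
      (fun m' k => setCell m' (ringCell x row col k).1 (ringCell x row col k).2 (getB border k)) matrix = M1 := by
    rw [hM1]
    apply PySem.List.foldl_congr_mem
    intro acc k hk
    rw [PySem.List.mem_pyRange_one] at hk
    simp only [ringCell]
    rw [if_pos (by omega)]
    exact setCell_congr _ (by omega) (by omega) rfl
  have E2 : (PySem.List.pyRange (col - 2 * x) (col - 2 * x + (row - 2 * x) - 1) 1).foldl
      (fun m' k => setCell m' (ringCell x row col k).1 (ringCell x row col k).2 (getB border k)) M1 = M2 := by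
    rw [hM2]
    apply PySem.List.foldl_congr_mem
    intro acc k hk
    rw [PySem.List.mem_pyRange_one] at hk
    simp only [ringCell]
    rw [if_neg (by omega), if_pos (by omega)]
  have E3 : (PySem.List.pyRange (col - 2 * x + (row - 2 * x) - 1) (2 * (col - 2 * x) + (row - 2 * x) - 2) 1).foldl
      (fun m' k => setCell m' (ringCell x row col k).1 (ringCell x row col k).2 (getB border k)) M2 = M3 := by
    rw [hM3]
    apply PySem.List.foldl_congr_mem
    intro acc k hk
    rw [PySem.List.mem_pyRange_one] at hk
    simp only [ringCell]
    rw [if_neg (by omega), if_neg (by omega), if_pos (by omega)]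
    exact setCell_congr _ (by omega) (by omega) rfl
  have E4 : (PySem.List.pyRange (2 * (col - 2 * x) + (row - 2 * x) - 2) (2 * (row - 2 * x) + 2 * (col - 2 * x) - 4) 1).foldl
      (fun m' k => setCell m' (ringCell x row col k).1 (ringCell x row col k).2 (getB border k)) M3
      = (PySem.List.pyRange (2 * (col - 2 * x) + (row - 2 * x) - 2) (2 * (row - 2 * x) + 2 * (col - 2 * x) - 4) 1).foldl
      (fun m' k => setCell m' (row - (x + 1 + (k - (2 * (col - 2 * x) + (row - 2 * x) - 2))) - 1) x (getB border k)) M3 := by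
    apply PySem.List.foldl_congr_mem
    intro acc k hk
    rw [PySem.List.mem_pyRange_one] at hk
    simp only [ringCell]
    rw [if_neg (by omega), if_neg (by omega), if_neg (by omega)]
    exact setCell_congr _ (by omega) (by omega) rfl
  rw [E1, E2, E3, E4]

lemma B_main (border : List Int) (matrix : List (List Int)) (x row col : Int)
    (hh : 2 ≤ row - 2 * x) (hw : 2 ≤ col - 2 * x) :
    rotate_border_x_alt border matrix x row col = ringFold border x row col matrix := by
  have hT : 2 * (row - 2 * x) + 2 * (col - 2 * x) - 4
      = 0 + (col - 2 * x - 1) + 1 + (row - 2 * x - 2) + 1 + (col - 2 * x - 2) + 1 + (row - 2 * x - 2) := by ring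
  unfold rotate_border_x_alt
  rw [if_neg (by omega), if_neg (by omega)]
  rw [hT]
  -- run 1: along the top row, heading right
  rw [PySem.List.pyRange_one_append 0 (0 + (col - 2 * x - 1)) (0 + (col - 2 * x - 1) + 1 + (row - 2 * x - 2) + 1 + (col - 2 * x - 2) + 1 + (row - 2 * x - 2)) (by omega) (by omega),
      List.foldl_append,
      walk_run' border x (row - x - 1) (col - x - 1) 0 1 (col - 2 * x - 1) 0 x x (by omega) (by intro j h0 hj; omega) matrix]
  -- corner 1: top-right
  rw [PySem.List.pyRange_one_append (0 + (col - 2 * x - 1)) (0 + (col - 2 * x - 1) + 1) (0 + (col - 2 * x - 1) + 1 + (row - 2 * x - 2) + 1 + (col - 2 * x - 2) + 1 + (row - 2 * x - 2)) (by omega) (by omega),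
      List.foldl_append,
      walk_turn border x (row - x - 1) (col - x - 1) (0 + (col - 2 * x - 1)) (x + (col - 2 * x - 1) * 0) (x + (col - 2 * x - 1) * 1) 0 1 _ (by omega)]
  -- run 2: down the right column
  rw [PySem.List.pyRange_one_append (0 + (col - 2 * x - 1) + 1) (0 + (col - 2 * x - 1) + 1 + (row - 2 * x - 2)) (0 + (col - 2 * x - 1) + 1 + (row - 2 * x - 2) + 1 + (col - 2 * x - 2) + 1 + (row - 2 * x - 2)) (by omega) (by omega),
      List.foldl_append,
      walk_run' border x (row - x - 1) (col - x - 1) 1 (-0) (row - 2 * x - 2) (0 + (col - 2 * x - 1) + 1) (x + (col - 2 * x - 1) * 0 + 1) (x + (col - 2 * x - 1) * 1 - 0) (by omega) (by intro j h0 hj; omega) _]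
  -- corner 2: bottom-right
  rw [PySem.List.pyRange_one_append (0 + (col - 2 * x - 1) + 1 + (row - 2 * x - 2)) (0 + (col - 2 * x - 1) + 1 + (row - 2 * x - 2) + 1) (0 + (col - 2 * x - 1) + 1 + (row - 2 * x - 2) + 1 + (col - 2 * x - 2) + 1 + (row - 2 * x - 2)) (by omega) (by omega),
      List.foldl_append,
      walk_turn border x (row - x - 1) (col - x - 1) (0 + (col - 2 * x - 1) + 1 + (row - 2 * x - 2)) (x + (col - 2 * x - 1) * 0 + 1 + (row - 2 * x - 2) * 1) (x + (col - 2 * x - 1) * 1 - 0 + (row - 2 * x - 2) * -0) 1 (-0) _ (by omega)]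
  -- run 3: along the bottom row, heading left
  rw [PySem.List.pyRange_one_append (0 + (col - 2 * x - 1) + 1 + (row - 2 * x - 2) + 1) (0 + (col - 2 * x - 1) + 1 + (row - 2 * x - 2) + 1 + (col - 2 * x - 2)) (0 + (col - 2 * x - 1) + 1 + (row - 2 * x - 2) + 1 + (col - 2 * x - 2) + 1 + (row - 2 * x - 2)) (by omega) (by omega),
      List.foldl_append,
      walk_run' border x (row - x - 1) (col - x - 1) (-0) (-1) (col - 2 * x - 2) (0 + (col - 2 * x - 1) + 1 + (row - 2 * x - 2) + 1) (x + (col - 2 * x - 1) * 0 + 1 + (row - 2 * x - 2) * 1 + -0) (x + (col - 2 * x - 1) * 1 - 0 + (row - 2 * x - 2) * -0 - 1) (by omega) (by intro j h0 hj; omega) _]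
  -- corner 3: bottom-left
  rw [PySem.List.pyRange_one_append (0 + (col - 2 * x - 1) + 1 + (row - 2 * x - 2) + 1 + (col - 2 * x - 2)) (0 + (col - 2 * x - 1) + 1 + (row - 2 * x - 2) + 1 + (col - 2 * x - 2) + 1) (0 + (col - 2 * x - 1) + 1 + (row - 2 * x - 2) + 1 + (col - 2 * x - 2) + 1 + (row - 2 * x - 2)) (by omega) (by omega),
      List.foldl_append,
      walk_turn border x (row - x - 1) (col - x - 1) (0 + (col - 2 * x - 1) + 1 + (row - 2 * x - 2) + 1 + (col - 2 * x - 2)) (x + (col - 2 * x - 1) * 0 + 1 + (row - 2 * x - 2) * 1 + -0 + (col - 2 * x - 2) * -0) (x + (col - 2 * x - 1) * 1 - 0 + (row - 2 * x - 2) * -0 - 1 + (col - 2 * x - 2) * -1) (-0) (-1) _ (by omega)]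
  -- run 4: up the left column
  rw [walk_run' border x (row - x - 1) (col - x - 1) (-1) (- -0) (row - 2 * x - 2) (0 + (col - 2 * x - 1) + 1 + (row - 2 * x - 2) + 1 + (col - 2 * x - 2) + 1) (x + (col - 2 * x - 1) * 0 + 1 + (row - 2 * x - 2) * 1 + -0 + (col - 2 * x - 2) * -0 + -1) (x + (col - 2 * x - 1) * 1 - 0 + (row - 2 * x - 2) * -0 - 1 + (col - 2 * x - 2) * -1 - -0) (by omega) (by intro j h0 hj; omega) _]
  dsimp only
  unfold ringFold
  rw [hT]
  rw [PySem.List.pyRange_one_append 0 (0 + (col - 2 * x - 1)) (0 + (col - 2 * x - 1) + 1 + (row - 2 * x - 2) + 1 + (col - 2 * x - 2) + 1 + (row - 2 * x - 2)) (by omega) (by omega),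
      List.foldl_append,
      PySem.List.pyRange_one_append (0 + (col - 2 * x - 1)) (0 + (col - 2 * x - 1) + 1) (0 + (col - 2 * x - 1) + 1 + (row - 2 * x - 2) + 1 + (col - 2 * x - 2) + 1 + (row - 2 * x - 2)) (by omega) (by omega),
      List.foldl_append,
      PySem.List.pyRange_one_append (0 + (col - 2 * x - 1) + 1) (0 + (col - 2 * x - 1) + 1 + (row - 2 * x - 2)) (0 + (col - 2 * x - 1) + 1 + (row - 2 * x - 2) + 1 + (col - 2 * x - 2) + 1 + (row - 2 * x - 2)) (by omega) (by omega),
      List.foldl_append,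
      PySem.List.pyRange_one_append (0 + (col - 2 * x - 1) + 1 + (row - 2 * x - 2)) (0 + (col - 2 * x - 1) + 1 + (row - 2 * x - 2) + 1) (0 + (col - 2 * x - 1) + 1 + (row - 2 * x - 2) + 1 + (col - 2 * x - 2) + 1 + (row - 2 * x - 2)) (by omega) (by omega),
      List.foldl_append,
      PySem.List.pyRange_one_append (0 + (col - 2 * x - 1) + 1 + (row - 2 * x - 2) + 1) (0 + (col - 2 * x - 1) + 1 + (row - 2 * x - 2) + 1 + (col - 2 * x - 2)) (0 + (col - 2 * x - 1) + 1 + (row - 2 * x - 2) + 1 + (col - 2 * x - 2) + 1 + (row - 2 * x - 2)) (by omega) (by omega),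
      List.foldl_append,
      PySem.List.pyRange_one_append (0 + (col - 2 * x - 1) + 1 + (row - 2 * x - 2) + 1 + (col - 2 * x - 2)) (0 + (col - 2 * x - 1) + 1 + (row - 2 * x - 2) + 1 + (col - 2 * x - 2) + 1) (0 + (col - 2 * x - 1) + 1 + (row - 2 * x - 2) + 1 + (col - 2 * x - 2) + 1 + (row - 2 * x - 2)) (by omega) (by omega),
      List.foldl_append]
  have E1 : ∀ init : List (List Int), (PySem.List.pyRange 0 (0 + (col - 2 * x - 1)) 1).foldl
      (fun m' k => setCell m' (ringCell x row col k).1 (ringCell x row col k).2 (getB border k)) init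
      = (PySem.List.pyRange 0 (0 + (col - 2 * x - 1)) 1).foldl
      (fun m' k => setCell m' (x + (k - 0) * 0) (x + (k - 0) * 1) (getB border k)) init := by
    intro init
    apply PySem.List.foldl_congr_mem
    intro acc k hk
    rw [PySem.List.mem_pyRange_one] at hk
    simp only [ringCell]
    rw [if_pos (by omega)]
    exact setCell_congr _ (by omega) (by omega) rfl
  have C1 : ∀ init : List (List Int), (PySem.List.pyRange (0 + (col - 2 * x - 1)) (0 + (col - 2 * x - 1) + 1) 1).foldl
      (fun m' k => setCell m' (ringCell x row col k).1 (ringCell x row col k).2 (getB border k)) init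
      = setCell init (x + (col - 2 * x - 1) * 0) (x + (col - 2 * x - 1) * 1) (getB border (0 + (col - 2 * x - 1))) := by
    intro init
    rw [PySem.List.pyRange_one_cons (by omega), PySem.List.pyRange_one_eq_nil (by omega),
        List.foldl_cons, List.foldl_nil]
    simp only [ringCell]
    rw [if_pos (by omega)]
    exact setCell_congr _ (by omega) (by omega) rfl
  have E2 : ∀ init : List (List Int), (PySem.List.pyRange (0 + (col - 2 * x - 1) + 1) (0 + (col - 2 * x - 1) + 1 + (row - 2 * x - 2)) 1).foldl
      (fun m' k => setCell m' (ringCell x row col k).1 (ringCell x row col k).2 (getB border k)) init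
      = (PySem.List.pyRange (0 + (col - 2 * x - 1) + 1) (0 + (col - 2 * x - 1) + 1 + (row - 2 * x - 2)) 1).foldl
      (fun m' k => setCell m' (x + (col - 2 * x - 1) * 0 + 1 + (k - (0 + (col - 2 * x - 1) + 1)) * 1) (x + (col - 2 * x - 1) * 1 - 0 + (k - (0 + (col - 2 * x - 1) + 1)) * -0) (getB border k)) init := by
    intro init
    apply PySem.List.foldl_congr_mem
    intro acc k hk
    rw [PySem.List.mem_pyRange_one] at hk
    simp only [ringCell]
    rw [if_neg (by omega), if_pos (by omega)]
    exact setCell_congr _ (by omega) (by omega) rfl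
  have C2 : ∀ init : List (List Int), (PySem.List.pyRange (0 + (col - 2 * x - 1) + 1 + (row - 2 * x - 2)) (0 + (col - 2 * x - 1) + 1 + (row - 2 * x - 2) + 1) 1).foldl
      (fun m' k => setCell m' (ringCell x row col k).1 (ringCell x row col k).2 (getB border k)) init
      = setCell init (x + (col - 2 * x - 1) * 0 + 1 + (row - 2 * x - 2) * 1) (x + (col - 2 * x - 1) * 1 - 0 + (row - 2 * x - 2) * -0) (getB border (0 + (col - 2 * x - 1) + 1 + (row - 2 * x - 2))) := by
    intro init
    rw [PySem.List.pyRange_one_cons (by omega), PySem.List.pyRange_one_eq_nil (by omega),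
        List.foldl_cons, List.foldl_nil]
    simp only [ringCell]
    rw [if_neg (by omega), if_pos (by omega)]
    exact setCell_congr _ (by omega) (by omega) rfl
  have E3 : ∀ init : List (List Int), (PySem.List.pyRange (0 + (col - 2 * x - 1) + 1 + (row - 2 * x - 2) + 1) (0 + (col - 2 * x - 1) + 1 + (row - 2 * x - 2) + 1 + (col - 2 * x - 2)) 1).foldl
      (fun m' k => setCell m' (ringCell x row col k).1 (ringCell x row col k).2 (getB border k)) init
      = (PySem.List.pyRange (0 + (col - 2 * x - 1) + 1 + (row - 2 * x - 2) + 1) (0 + (col - 2 * x - 1) + 1 + (row - 2 * x - 2) + 1 + (col - 2 * x - 2)) 1).foldl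
      (fun m' k => setCell m' (x + (col - 2 * x - 1) * 0 + 1 + (row - 2 * x - 2) * 1 + -0 + (k - (0 + (col - 2 * x - 1) + 1 + (row - 2 * x - 2) + 1)) * -0) (x + (col - 2 * x - 1) * 1 - 0 + (row - 2 * x - 2) * -0 - 1 + (k - (0 + (col - 2 * x - 1) + 1 + (row - 2 * x - 2) + 1)) * -1) (getB border k)) init := by
    intro init
    apply PySem.List.foldl_congr_mem
    intro acc k hk
    rw [PySem.List.mem_pyRange_one] at hk
    simp only [ringCell]
    rw [if_neg (by omega), if_neg (by omega), if_pos (by omega)]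
    exact setCell_congr _ (by omega) (by omega) rfl
  have C3 : ∀ init : List (List Int), (PySem.List.pyRange (0 + (col - 2 * x - 1) + 1 + (row - 2 * x - 2) + 1 + (col - 2 * x - 2)) (0 + (col - 2 * x - 1) + 1 + (row - 2 * x - 2) + 1 + (col - 2 * x - 2) + 1) 1).foldl
      (fun m' k => setCell m' (ringCell x row col k).1 (ringCell x row col k).2 (getB border k)) init
      = setCell init (x + (col - 2 * x - 1) * 0 + 1 + (row - 2 * x - 2) * 1 + -0 + (col - 2 * x - 2) * -0) (x + (col - 2 * x - 1) * 1 - 0 + (row - 2 * x - 2) * -0 - 1 + (col - 2 * x - 2) * -1) (getB border (0 + (col - 2 * x - 1) + 1 + (row - 2 * x - 2) + 1 + (col - 2 * x - 2))) := by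
    intro init
    rw [PySem.List.pyRange_one_cons (by omega), PySem.List.pyRange_one_eq_nil (by omega),
        List.foldl_cons, List.foldl_nil]
    simp only [ringCell]
    rw [if_neg (by omega), if_neg (by omega), if_pos (by omega)]
    exact setCell_congr _ (by omega) (by omega) rfl
  have E4 : ∀ init : List (List Int), (PySem.List.pyRange (0 + (col - 2 * x - 1) + 1 + (row - 2 * x - 2) + 1 + (col - 2 * x - 2) + 1) (0 + (col - 2 * x - 1) + 1 + (row - 2 * x - 2) + 1 + (col - 2 * x - 2) + 1 + (row - 2 * x - 2)) 1).foldl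
      (fun m' k => setCell m' (ringCell x row col k).1 (ringCell x row col k).2 (getB border k)) init
      = (PySem.List.pyRange (0 + (col - 2 * x - 1) + 1 + (row - 2 * x - 2) + 1 + (col - 2 * x - 2) + 1) (0 + (col - 2 * x - 1) + 1 + (row - 2 * x - 2) + 1 + (col - 2 * x - 2) + 1 + (row - 2 * x - 2)) 1).foldl
      (fun m' k => setCell m' (x + (col - 2 * x - 1) * 0 + 1 + (row - 2 * x - 2) * 1 + -0 + (col - 2 * x - 2) * -0 + -1 + (k - (0 + (col - 2 * x - 1) + 1 + (row - 2 * x - 2) + 1 + (col - 2 * x - 2) + 1)) * -1) (x + (col - 2 * x - 1) * 1 - 0 + (row - 2 * x - 2) * -0 - 1 + (col - 2 * x - 2) * -1 - -0 + (k - (0 + (col - 2 * x - 1) + 1 + (row - 2 * x - 2) + 1 + (col - 2 * x - 2) + 1)) * - -0) (getB border k)) init := by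
    intro init
    apply PySem.List.foldl_congr_mem
    intro acc k hk
    rw [PySem.List.mem_pyRange_one] at hk
    simp only [ringCell]
    rw [if_neg (by omega), if_neg (by omega), if_neg (by omega)]
    exact setCell_congr _ (by omega) (by omega) rfl
  rw [E1, C1, E2, C2, E3, C3, E4]

lemma guard1 (border : List Int) (matrix : List (List Int)) (x row col : Int)
    (h1 : row - x - 1 = x) :
    rotate_border_x border matrix x row col = rotate_border_x_alt border matrix x row col := by
  unfold rotate_border_x rotate_border_x_alt
  rw [if_pos h1, if_pos h1]
  have hA := seg_aux border (fun i => ((x : Int), i)) ((col - x) - x).toNat x (col - x) 0 matrix rfl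
  simp only at hA
  rw [hA]
  dsimp only
  rw [range_shift (fun m i => setCell m x i (getB border (i - x))) x (col - x) matrix,
      show (0:Int) + (col - x - x) = col - x - x by ring]
  apply PySem.List.foldl_congr_mem
  intro acc k _
  exact setCell_congr _ rfl (by omega) (by rw [show x + k - x = k by ring])

lemma guard2 (border : List Int) (matrix : List (List Int)) (x row col : Int)
    (h1 : ¬ (row - x - 1 = x)) (h2 : col - x - 1 = x) :
    rotate_border_x border matrix x row col = rotate_border_x_alt border matrix x row col := by
  unfold rotate_border_x rotate_border_x_alt
  rw [if_neg h1, if_pos h2, if_neg h1, if_pos h2]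
  have hA := seg_aux border (fun i => (i, col - x - 1)) ((row - x) - x).toNat x (row - x) 0 matrix rfl
  simp only at hA
  rw [hA]
  dsimp only
  rw [range_shift (fun m i => setCell m i (col - x - 1) (getB border (i - x))) x (row - x) matrix,
      show (0:Int) + (row - x - x) = row - x - x by ring]
  apply PySem.List.foldl_congr_mem
  intro acc k _
  exact setCell_congr _ (by omega) rfl (by rw [show x + k - x = k by ring])

-- an empty ring (both dimensions ≤ 0): every loop of A and B's whole walk are empty
lemma empty_main (border : List Int) (matrix : List (List Int)) (x row col : Int)
    (h1 : ¬ (row - x - 1 = x)) (h2 : ¬ (col - x - 1 = x))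
    (hh : row - 2 * x ≤ 0) (hw : col - 2 * x ≤ 0) :
    rotate_border_x border matrix x row col = rotate_border_x_alt border matrix x row col := by
  unfold rotate_border_x rotate_border_x_alt
  rw [if_neg h1, if_neg h2, if_neg h1, if_neg h2,
      PySem.List.pyRange_one_eq_nil (show col - x ≤ x by omega),
      PySem.List.pyRange_one_eq_nil (show row - x ≤ x + 1 by omega),
      PySem.List.pyRange_one_eq_nil (show col - x ≤ x + 1 by omega),
      PySem.List.pyRange_one_eq_nil (show row - x - 1 ≤ x + 1 by omega),
      PySem.List.pyRange_one_eq_nil (show 2 * (row - 2 * x) + 2 * (col - 2 * x) - 4 ≤ 0 by omega)]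
  simp only [List.foldl_nil]

theorem rotate_border_x_spec : Claim_equal_rotate_border_x := by
  intro border matrix x row col _ hPre
  obtain ⟨hD, -⟩ := hPre
  unfold Spec_rotate_border_x
  by_cases h1 : row - x - 1 = x
  · exact guard1 border matrix x row col h1
  · by_cases h2 : col - x - 1 = x
    · exact guard2 border matrix x row col h1 h2
    · by_cases hc : 2 ≤ row - 2 * x
      · rw [A_main border matrix x row col hc (by omega),
            B_main border matrix x row col hc (by omega)]
      · exact empty_main border matrix x row col h1 h2 (by omega) (by omega)
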